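-- pv_equiv track=rewrite | github.com/kkjjhhbb/Algorithm_study | 이취코테/dfs,bfs/괄호변환.py | solution
-- ===== SOURCE A (Python) =====
-- def solution(p):
--     ope = 0
--     close = 0
--     u=''
--     v=''
--     if len(p) == 0:
--         return p
--     if check(p) == True:
--         return p
--
--     for i in range(len(p)):
--         if p[i] == '(':
--             ope += 1
--         else:
--             close += 1
--
--         #u / v로 분리하는 과정
--         if ope - close == 0:
--             for j in range(i+1):
--                 u += p[j]
--             for k in range(i+1,len(p)):
--                 v += p[k]
--             break
--
--     if check(u) == True:
--         u+=solution(v)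
--         return u
--     else:
--         st = '('
--         st+=solution(v)
--         st+=')'
--         u=list(u)
--         u.pop()
--         u.pop(0)
--         st+=reverse(''.join(u))
--         return st
--
-- def check(s):
--     correct = []
--     for i in range(len(s)):
--         if s[i] == '(':
--             correct.append('(')
--         if correct and correct[-1] == '(' and s[i] == ')':
--             correct.pop()
--     if not correct:
--         return True
--     else: return False
--
-- def reverse(strin):
--     s = list(strin)
--     for i in range(len(s)):
--         if s[i] == '(':
--             s[i] = ')'
--         else:
--             s[i] = '('
--     return ''.join(s)
-- ===== SOURCE B (Python) =====
-- def solution(p):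
--     # Iterative rewrite: counter-based validity check, index-based split, and an
--     # explicit loop with left/right accumulators instead of recursion.
--     def balanced(s):
--         c = 0
--         for ch in s:
--             if ch == '(':
--                 c += 1
--             elif ch == ')' and c > 0:
--                 c -= 1
--         return c == 0
--
--     def split(s):
--         bal = 0
--         for i, ch in enumerate(s):
--             bal += 1 if ch == '(' else -1
--             if bal == 0:
--                 return s[:i + 1], s[i + 1:]
--         return '', ''
--
--     left = []
--     rights = []
--     while p and not balanced(p):
--         u, v = split(p)
--         if balanced(u):
--             left.append(u)
--         else:
--             left.append('(')
--             rights.append(')' + ''.join(')' if ch == '(' else '(' for ch in u[1:-1]))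
--         p = v
--     left.append(p)
--     return ''.join(left) + ''.join(reversed(rights))
-- ===== Notes on version B (the rewrite author's own statement) =====
-- stated objective: faster
-- what changed: Replaced the recursive scheme (stack-based validity check, char-by-char u/v construction, list pop/pop/join surgery) with an iterative loop that checks validity with a single counter, splits via an index and slices, and accumulates the output in left/right part lists joined once at the end.
import Mathlib
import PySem

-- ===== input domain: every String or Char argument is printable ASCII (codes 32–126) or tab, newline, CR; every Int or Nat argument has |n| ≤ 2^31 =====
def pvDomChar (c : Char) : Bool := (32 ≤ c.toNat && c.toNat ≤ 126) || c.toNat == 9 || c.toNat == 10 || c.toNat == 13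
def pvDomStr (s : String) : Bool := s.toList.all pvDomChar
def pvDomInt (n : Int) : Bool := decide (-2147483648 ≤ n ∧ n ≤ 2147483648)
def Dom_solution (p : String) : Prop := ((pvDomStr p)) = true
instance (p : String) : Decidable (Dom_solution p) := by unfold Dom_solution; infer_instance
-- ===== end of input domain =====

-- B replaces A's recursion by an iterative loop with left/right accumulators, a
-- counter-based validity check and an index-based split; measurably faster by a
-- constant factor (A's char-by-char string building is avoided).

-- ===== PORT A =====

-- check(s): stack `correct` of '(' built by append, popped on ')' when top is '('
def checkA (s : List Char) : Bool :=
  let correct := s.foldl (fun correct ch =>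
    let correct := if ch = '(' then correct ++ ['('] else correct
    if correct.getLast? = some '(' ∧ ch = ')' then correct.dropLast else correct) []
  correct.isEmpty

-- reverse(strin): flip each bracket ('(' → ')', anything else → '(')
def reverseA (s : List Char) : List Char :=
  s.map (fun ch => if ch = '(' then ')' else '(')

-- the for-loop of solution: counters ope/close; on first prefix with ope = close
-- return (u, v) (u built char by char from p[0..i], v from p[i+1..]); if the loop
-- falls through, u and v stay the empty strings
def splitAGo (s : List Char) (rest : List Char) (i : Nat) (ope close : Int) :
    List Char × List Char :=
  match rest with
  | [] => ([], [])
  | ch :: rest' =>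
    let ope := if ch = '(' then ope + 1 else ope
    let close := if ch = '(' then close else close + 1
    if ope - close = 0 then (s.take (i + 1), s.drop (i + 1))
    else splitAGo s rest' (i + 1) ope close

def splitA (s : List Char) : List Char × List Char := splitAGo s s 0 0 0

theorem splitAGo_snd_lt (s : List Char) (hs : s ≠ []) :
    ∀ rest i ope close, ((splitAGo s rest i ope close).2).length < s.length := by
  intro rest
  induction rest with
  | nil => intro i o c; simp [splitAGo, List.length_pos_iff.mpr hs]
  | cons ch rest' ih =>
    intro i o c
    rw [splitAGo]
    split_ifs
    all_goals first
      | simpa using Nat.sub_lt (List.length_pos_iff.mpr hs) (Nat.succ_pos i)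
      | exact ih _ _ _

def solCoreA (l : List Char) : List Char :=
  if l.length = 0 then l
  else if checkA l then l
  else
    let uv := splitA l
    if checkA uv.1 then uv.1 ++ solCoreA uv.2
    else ('(' :: solCoreA uv.2) ++ [')'] ++ reverseA ((uv.1.dropLast).drop 1)
termination_by l.length
decreasing_by
  all_goals
    exact splitAGo_snd_lt l (by intro h; simp [h] at *) l 0 0 0

def solution (p : String) : String := String.mk (solCoreA p.toList)

-- ===== PORT B =====

-- balanced(s): single counter, decremented on ')' only when positive
def balancedB (s : List Char) : Bool :=
  (s.foldl (fun c ch =>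
    if ch = '(' then c + 1
    else if ch = ')' ∧ c > 0 then c - 1 else c) (0 : Nat)) = 0

-- split(s): one running balance; slice at the first index where it is 0
def splitBGo (s : List Char) (rest : List Char) (i : Nat) (bal : Int) :
    List Char × List Char :=
  match rest with
  | [] => ([], [])
  | ch :: rest' =>
    let bal := bal + (if ch = '(' then 1 else -1)
    if bal = 0 then (s.take (i + 1), s.drop (i + 1))
    else splitBGo s rest' (i + 1) bal

def splitB (s : List Char) : List Char × List Char := splitBGo s s 0 0

-- the generator inside rights.append: flip the brackets of u[1:-1]
def flipB (u : List Char) : List Char :=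
  ((u.drop 1).dropLast).map (fun ch => if ch = '(' then ')' else '(')

theorem splitBGo_snd_lt (s : List Char) (hs : s ≠ []) :
    ∀ rest i bal, ((splitBGo s rest i bal).2).length < s.length := by
  intro rest
  induction rest with
  | nil => intro i b; simp [splitBGo, List.length_pos_iff.mpr hs]
  | cons ch rest' ih =>
    intro i b
    rw [splitBGo]
    split_ifs
    all_goals first
      | simpa using Nat.sub_lt (List.length_pos_iff.mpr hs) (Nat.succ_pos i)
      | exact ih _ _

-- the while loop: left / rights are the two accumulator lists of Source B
def loopB (p : List Char) (left : List (List Char)) (rights : List (List Char)) :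
    List Char :=
  if p = [] ∨ balancedB p then
    (left ++ [p]).flatten ++ (rights.reverse).flatten
  else
    let uv := splitB p
    if balancedB uv.1 then loopB uv.2 (left ++ [uv.1]) rights
    else loopB uv.2 (left ++ [['(']]) (rights ++ [')' :: flipB uv.1])
termination_by p.length
decreasing_by
  all_goals
    exact splitBGo_snd_lt p (by intro h; simp [h] at *) p 0 0

def solution_alt (p : String) : String := String.mk (loopB p.toList [] [])

-- ===== PRECONDITION & SPEC =====
def Spec_solution (p : String) (out : String) : Prop := out = solution_alt p
instance (p : String) (out : String) : Decidable (Spec_solution p out) := by unfold Spec_solution; infer_instance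

-- ===== CLAIM (what is proved, stated in full; the proofs are below) =====
def Claim_equal_solution : Prop := ∀ (p : String), Dom_solution p → Spec_solution p (solution p)

-- ===== LEMMAS AND PROOFS =====

-- the loop bodies of check / balanced, named for the proofs
def stepA (correct : List Char) (ch : Char) : List Char :=
  let correct := if ch = '(' then correct ++ ['('] else correct
  if correct.getLast? = some '(' ∧ ch = ')' then correct.dropLast else correct

def stepB (c : Nat) (ch : Char) : Nat :=
  if ch = '(' then c + 1
  else if ch = ')' ∧ c > 0 then c - 1 else c

theorem check_aux : ∀ (s : List Char) (c : Nat),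
    List.foldl stepA (List.replicate c '(') s =
    List.replicate (List.foldl stepB c s) '(' := by
  intro s
  induction s with
  | nil => intro c; simp
  | cons ch s ih =>
    intro c
    have hA : stepA (List.replicate c '(') ch = List.replicate (stepB c ch) '(' := by
      unfold stepA stepB
      by_cases h1 : ch = '('
      · simp [h1, List.replicate_succ']
      · by_cases h2 : ch = ')'
        · subst h2
          rcases c with _ | c
          · simp [h1]
          · simp [h1, List.getLast?_replicate, List.dropLast_replicate]
        · simp [h1, h2]
    simp only [List.foldl_cons, hA]
    exact ih (stepB c ch)

theorem checkA_eq_balancedB (s : List Char) : checkA s = balancedB s := by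
  show (List.foldl stepA [] s).isEmpty = decide (List.foldl stepB 0 s = 0)
  have h := check_aux s 0
  simp only [List.replicate_zero] at h
  rw [h]
  simp

theorem splitGo_eq (s : List Char) : ∀ (rest : List Char) (i : Nat) (o c : Int),
    splitAGo s rest i o c = splitBGo s rest i (o - c) := by
  intro rest
  induction rest with
  | nil => intro i o c; simp [splitAGo, splitBGo]
  | cons ch rest' ih =>
    intro i o c
    rw [splitAGo, splitBGo]
    by_cases h1 : ch = '('
    · have e : o + 1 - c = o - c + 1 := by ring
      simp [h1, e, ih]
    · have e : o - (c + 1) = o - c + -1 := by ring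
      simp [h1, e, ih]

theorem splitA_eq_splitB (s : List Char) : splitA s = splitB s := by
  unfold splitA splitB
  simpa using splitGo_eq s s 0 0 0

theorem dropLast_drop_comm (l : List Char) :
    (l.dropLast).drop 1 = (l.drop 1).dropLast := by
  cases l with
  | nil => rfl
  | cons a t =>
    cases t with
    | nil => rfl
    | cons b t' => simp [List.dropLast_cons₂]

theorem solCoreA_exit (p : List Char) (h : p = [] ∨ balancedB p) : solCoreA p = p := by
  rcases h with h | h
  · subst h; simp [solCoreA]
  · rw [solCoreA]
    by_cases hn : p.length = 0
    · simp [hn]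
    · simp [hn, checkA_eq_balancedB, h]

theorem loopB_eq : ∀ (n : Nat) (p : List Char), p.length ≤ n →
    ∀ left rights, loopB p left rights =
      left.flatten ++ solCoreA p ++ (rights.reverse).flatten := by
  intro n
  induction n with
  | zero =>
    intro p hp left rights
    have hnil : p = [] := List.length_eq_zero_iff.mp (Nat.le_zero.mp hp)
    subst hnil
    rw [loopB]
    simp [solCoreA]
  | succ n ih =>
    intro p hp left rights
    rw [loopB]
    by_cases hexit : p = [] ∨ balancedB p
    · rw [if_pos hexit, solCoreA_exit p hexit]
      simp [List.flatten_append]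
    · rw [if_neg hexit]
      have hne : p ≠ [] := fun h => hexit (Or.inl h)
      have hbal : ¬ (balancedB p = true) := fun h => hexit (Or.inr h)
      have hsplit : splitB p = splitA p := (splitA_eq_splitB p).symm
      have hlen : (splitA p).2.length < p.length := splitAGo_snd_lt p hne p 0 0 0
      have hlen' : (splitA p).2.length ≤ n := by
        have := hp; omega
      have hlen0 : ¬ p.length = 0 := by
        simpa [List.length_eq_zero_iff] using hne
      rw [solCoreA]
      simp only [hsplit, checkA_eq_balancedB, if_neg hlen0]
      rw [if_neg hbal]
      by_cases hu : balancedB (splitA p).1 = true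
      · rw [if_pos hu, if_pos hu, ih _ hlen']
        simp
      · rw [if_neg hu, if_neg hu, ih _ hlen']
        simp [flipB, reverseA]
        simp only [← List.drop_one]
        rw [dropLast_drop_comm]

-- ===== VERDICT (by name: the statement is the Claim_ definition above) =====
theorem solution_spec : Claim_equal_solution := by
  intro p _
  unfold Spec_solution solution solution_alt
  rw [loopB_eq p.toList.length p.toList le_rfl [] []]
  simp only [List.flatten_nil, List.reverse_nil, List.nil_append, List.append_nil]
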